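-- pv_equiv track=rewrite | github.com/kellisCookies/Rosalind_Learnings | theEverythingFile.py | count_transcribe
-- ===== SOURCE A (Python) =====
-- def count_transcribe(string1):
--     string2=""
--     result_array=[0,0,0,0]
--     for x in string1:
--         if x == "A":
--             result_array[0] = result_array[0]+1
--             string2 = string2 + "A"
--         if x =="C":
--             result_array[1] = result_array[1]+1
--             string2 = string2 + "C"
--         if x == "G":
--             result_array[2] = result_array[2]+1
--             string2 = string2 + "G"
--         if x == "T":
--             result_array[3] = result_array[3]+1
--             string2 = string2 + "U"
--     return (result_array, string2)
-- ===== SOURCE B (Python) =====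
-- def count_transcribe(string1):
--     chars = list(string1)
--     bases = "ACGT"
--     base_set = set(bases)
--     counts = [chars.count(b) for b in bases]
--     string2 = "".join("U" if c == "T" else c for c in chars if c in base_set)
--     return (counts, string2)
-- ===== Notes on version B (the rewrite author's own statement) =====
-- stated objective: idiomatic
-- what changed: Replaces A's single fused loop that mutates a counter array and accumulates the output string character by character with four independent list.count scans plus one separate filter-and-join transcription pass.
import Mathlib
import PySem

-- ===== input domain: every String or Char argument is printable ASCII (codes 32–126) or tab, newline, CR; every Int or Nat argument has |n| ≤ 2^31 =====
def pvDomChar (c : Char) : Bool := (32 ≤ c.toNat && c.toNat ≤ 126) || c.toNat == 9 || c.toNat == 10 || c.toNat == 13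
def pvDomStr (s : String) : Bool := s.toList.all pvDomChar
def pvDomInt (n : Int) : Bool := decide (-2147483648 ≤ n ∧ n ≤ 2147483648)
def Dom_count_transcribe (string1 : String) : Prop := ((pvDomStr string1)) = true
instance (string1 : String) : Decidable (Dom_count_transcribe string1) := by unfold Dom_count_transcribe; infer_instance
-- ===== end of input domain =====

-- B replaces A's fused counting/concatenating loop with four independent count scans plus one filter-and-map transcription pass (idiomatic decomposition).


-- ===== PORT A =====
-- loop body of A: four sequential ifs updating result_array (indices always in range 0..3) and string2 (modeled as List Char)
def ctStepA (st : List Int × List Char) (x : Char) : List Int × List Char :=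
  let st := if x = 'A' then (st.1.set 0 (st.1.getD 0 0 + 1), st.2 ++ ['A']) else st
  let st := if x = 'C' then (st.1.set 1 (st.1.getD 1 0 + 1), st.2 ++ ['C']) else st
  let st := if x = 'G' then (st.1.set 2 (st.1.getD 2 0 + 1), st.2 ++ ['G']) else st
  let st := if x = 'T' then (st.1.set 3 (st.1.getD 3 0 + 1), st.2 ++ ['U']) else st
  st

def count_transcribe (string1 : String) : List Int × String :=
  let r := string1.toList.foldl ctStepA ([0, 0, 0, 0], [])
  (r.1, String.mk r.2)

-- ===== PORT B =====
def count_transcribe_alt (string1 : String) : List Int × String :=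
  let chars := string1.toList
  let bases := "ACGT"
  let baseSet := PySem.Set.ofList bases.toList
  let counts := bases.toList.map (fun b => (chars.count b : Int))
  let string2 := String.mk ((chars.filter (fun c => decide (c ∈ baseSet))).map
    (fun c => if c = 'T' then 'U' else c))
  (counts, string2)

-- ===== PRECONDITION & SPEC =====
def Spec_count_transcribe (string1 : String) (out : List Int × String) : Prop := out = count_transcribe_alt string1
instance (string1 : String) (out : List Int × String) : Decidable (Spec_count_transcribe string1 out) := by unfold Spec_count_transcribe; infer_instance

-- ===== CLAIM (what is proved, stated in full; the proofs are below) =====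
def Claim_equal_count_transcribe : Prop := ∀ (string1 : String), Dom_count_transcribe string1 → Spec_count_transcribe string1 (count_transcribe string1)

-- ===== LEMMAS AND PROOFS =====

def ctTrans (l : List Char) : List Char :=
  (l.filter (fun c => decide (c ∈ (['A', 'C', 'G', 'T'] : List Char)))).map
    (fun c => if c = 'T' then 'U' else c)

theorem ctFold (l : List Char) : ∀ (a c g t : Int) (s2 : List Char),
    l.foldl ctStepA ([a, c, g, t], s2) =
      ([a + (l.count 'A' : Int), c + (l.count 'C' : Int), g + (l.count 'G' : Int),
        t + (l.count 'T' : Int)], s2 ++ ctTrans l) := by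
  induction l with
  | nil => intro a c g t s2; simp [ctTrans]
  | cons x xs ih =>
    intro a c g t s2
    by_cases hA : x = 'A' <;> by_cases hC : x = 'C' <;> by_cases hG : x = 'G' <;>
      by_cases hT : x = 'T' <;>
      simp_all [List.foldl_cons, ctStepA, ctTrans, List.count_cons] <;> ring_nf

-- ===== VERDICT (by name: the statement is the Claim_ definition above) =====
theorem count_transcribe_spec : Claim_equal_count_transcribe := by
  intro s _
  show _ = _
  have hl : "ACGT".toList = ['A', 'C', 'G', 'T'] := by decide
  simp [count_transcribe, count_transcribe_alt, ctFold, ctTrans, hl]
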